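-- pv_equiv track=rewrite | github.com/NewMediaStudio/hush-engine | tools/analyze_dataset_quality.py | has_case_corruption
-- ===== SOURCE A (Python) =====
-- def has_case_corruption(text: str) -> bool:
--     """Check if text has corrupted casing (random caps in middle of words)."""
--     if not text or len(text) < 3:
--         return False
--
--     # Check for unusual capitalization patterns
--     words = text.split()
--     for word in words:
--         if len(word) < 2:
--             continue
--         # Check for lowercase letter followed by uppercase in middle of word
--         for i in range(1, len(word) - 1):
--             if word[i].isupper() and word[i-1].islower() and word[i+1].islower():
--                 return True
--     return False
-- ===== SOURCE B (Python) =====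
-- def has_case_corruption(text: str) -> bool:
--     """Check if text has corrupted casing (random caps in middle of words)."""
--     # Flat single pass: a lower-upper-lower triple of adjacent characters can
--     # only occur inside one word, so no splitting into words is needed.
--     return any(a.islower() and b.isupper() and c.islower()
--                for a, b, c in zip(text, text[1:], text[2:]))
-- ===== Notes on version B (the rewrite author's own statement) =====
-- stated objective: simpler
-- what changed: Replaced the word-splitting with nested loops and index arithmetic by a single flat scan over consecutive character triples of the whole text (a lower-upper-lower triple can never span a whitespace boundary, and short inputs yield no triples).
import Mathlib
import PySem

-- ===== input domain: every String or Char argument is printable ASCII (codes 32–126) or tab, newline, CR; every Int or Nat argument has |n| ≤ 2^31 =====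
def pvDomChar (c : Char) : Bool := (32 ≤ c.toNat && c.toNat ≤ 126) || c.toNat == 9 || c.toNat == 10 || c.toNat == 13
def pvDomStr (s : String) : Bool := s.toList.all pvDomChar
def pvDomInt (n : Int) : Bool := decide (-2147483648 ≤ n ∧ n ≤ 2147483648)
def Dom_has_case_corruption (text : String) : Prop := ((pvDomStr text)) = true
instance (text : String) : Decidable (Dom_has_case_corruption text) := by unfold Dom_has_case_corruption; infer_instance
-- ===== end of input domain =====

-- B replaces A's word split + nested loops by one flat scan of adjacent character triples (simpler; return value only, no side effects involved).

-- ===== PORT A =====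
-- A's inner loop over one word: for i in range(1, len(word)-1): word[i].isupper() and word[i-1].islower() and word[i+1].islower()
def hccWord (w : List Char) : Bool :=
  if w.length < 2 then false
  else
    (PySem.List.pyRange 1 ((w.length : Int) - 1) 1).any (fun i =>
      PySem.Chars.isupper (PySem.List.pyGetD w i ' ') &&
      PySem.Chars.islower (PySem.List.pyGetD w (i - 1) ' ') &&
      PySem.Chars.islower (PySem.List.pyGetD w (i + 1) ' '))

def has_case_corruption (text : String) : Bool :=
  if text = "" || text.toList.length < 3 then false
  else (PySem.Chars.split₀ text.toList).any hccWord

-- ===== PORT B =====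
def tripleScan : List Char → Bool
  | a :: b :: c :: rest =>
      (PySem.Chars.islower a && PySem.Chars.isupper b && PySem.Chars.islower c)
      || tripleScan (b :: c :: rest)
  | _ => false

def has_case_corruption_alt (text : String) : Bool := tripleScan text.toList

-- ===== PRECONDITION & SPEC =====
def Spec_has_case_corruption (text : String) (out : Bool) : Prop := out = has_case_corruption_alt text
instance (text : String) (out : Bool) : Decidable (Spec_has_case_corruption text out) := by unfold Spec_has_case_corruption; infer_instance

-- ===== CLAIM (what is proved, stated in full; the proofs are below) =====
def Claim_equal_has_case_corruption : Prop := ∀ (text : String), Dom_has_case_corruption text → Spec_has_case_corruption text (has_case_corruption text)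

-- ===== LEMMAS AND PROOFS =====

theorem tripleScan_iff (l : List Char) :
    tripleScan l = true ↔ ∃ j, j + 2 < l.length ∧
      (PySem.Chars.islower (l.getD j ' ') && PySem.Chars.isupper (l.getD (j+1) ' ') &&
       PySem.Chars.islower (l.getD (j+2) ' ')) = true := by
  induction l with
  | nil => simp [tripleScan]
  | cons a t ih =>
    match t with
    | [] => simp [tripleScan]
    | [b] =>
      simp only [tripleScan, List.length_cons, List.length_nil]
      constructor
      · intro h; exact absurd h (by simp)
      · rintro ⟨j, hj, _⟩; omega
    | b :: c :: r =>
      rw [tripleScan]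
      constructor
      · intro h
        rcases Bool.or_eq_true_iff.mp h with h | h
        · exact ⟨0, by simp, by simpa using h⟩
        · obtain ⟨j, hj, hcond⟩ := ih.mp h
          exact ⟨j + 1, by simpa using hj, by simpa using hcond⟩
      · rintro ⟨j, hj, hcond⟩
        cases j with
        | zero => exact Bool.or_eq_true_iff.mpr (Or.inl (by simpa using hcond))
        | succ j' =>
          exact Bool.or_eq_true_iff.mpr (Or.inr (ih.mpr ⟨j', by simpa using hj, by simpa using hcond⟩))

theorem tripleScan_short (l : List Char) (h : l.length < 3) : tripleScan l = false := by
  rw [Bool.eq_false_iff]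
  intro hc
  obtain ⟨j, hj, _⟩ := (tripleScan_iff l).mp hc
  omega

theorem hccWord_eq (w : List Char) : hccWord w = tripleScan w := by
  by_cases hlen : w.length < 2
  · rw [tripleScan_short w (by omega)]
    simp [hccWord, hlen]
  · rw [hccWord, if_neg hlen]
    rw [Bool.eq_iff_iff, List.any_eq_true, tripleScan_iff]
    constructor
    · rintro ⟨i, hmem, hcond⟩
      rw [PySem.List.mem_pyRange_one] at hmem
      obtain ⟨h1, h2⟩ := hmem
      refine ⟨(i - 1).toNat, by omega, ?_⟩
      have g1 : PySem.List.pyGetD w i ' ' = w.getD ((i - 1).toNat + 1) ' ' := by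
        have hcast : i = (((i - 1).toNat + 1 : Nat) : Int) := by omega
        calc PySem.List.pyGetD w i ' '
            = PySem.List.pyGetD w (((i - 1).toNat + 1 : Nat) : Int) ' ' := by rw [← hcast]
          _ = w.getD ((i - 1).toNat + 1) ' ' := PySem.List.pyGetD_natCast w _ ' '
      have g0 : PySem.List.pyGetD w (i - 1) ' ' = w.getD ((i - 1).toNat) ' ' := by
        have hcast : i - 1 = (((i - 1).toNat : Nat) : Int) := by omega
        calc PySem.List.pyGetD w (i - 1) ' '
            = PySem.List.pyGetD w (((i - 1).toNat : Nat) : Int) ' ' := by rw [← hcast]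
          _ = w.getD ((i - 1).toNat) ' ' := PySem.List.pyGetD_natCast w _ ' '
      have g2 : PySem.List.pyGetD w (i + 1) ' ' = w.getD ((i - 1).toNat + 2) ' ' := by
        have hcast : i + 1 = (((i - 1).toNat + 2 : Nat) : Int) := by omega
        calc PySem.List.pyGetD w (i + 1) ' '
            = PySem.List.pyGetD w (((i - 1).toNat + 2 : Nat) : Int) ' ' := by rw [← hcast]
          _ = w.getD ((i - 1).toNat + 2) ' ' := PySem.List.pyGetD_natCast w _ ' '
      rw [g1, g0, g2] at hcond
      rw [Bool.and_assoc] at hcond ⊢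
      rcases Bool.and_eq_true_iff.mp hcond with ⟨hu, hll⟩
      rcases Bool.and_eq_true_iff.mp hll with ⟨hl0, hl2⟩
      exact Bool.and_eq_true_iff.mpr ⟨hl0, Bool.and_eq_true_iff.mpr ⟨hu, hl2⟩⟩
    · rintro ⟨j, hj, hcond⟩
      refine ⟨(j : Int) + 1, PySem.List.mem_pyRange_one.mpr ⟨by omega, by omega⟩, ?_⟩
      have g1 : PySem.List.pyGetD w ((j : Int) + 1) ' ' = w.getD (j + 1) ' ' := by
        calc PySem.List.pyGetD w ((j : Int) + 1) ' '
            = PySem.List.pyGetD w (((j + 1 : Nat) : Int)) ' ' := by norm_cast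
          _ = w.getD (j + 1) ' ' := PySem.List.pyGetD_natCast w _ ' '
      have g0 : PySem.List.pyGetD w ((j : Int) + 1 - 1) ' ' = w.getD j ' ' := by
        calc PySem.List.pyGetD w ((j : Int) + 1 - 1) ' '
            = PySem.List.pyGetD w (((j : Nat) : Int)) ' ' := by norm_num
          _ = w.getD j ' ' := PySem.List.pyGetD_natCast w _ ' '
      have g2 : PySem.List.pyGetD w ((j : Int) + 1 + 1) ' ' = w.getD (j + 2) ' ' := by
        calc PySem.List.pyGetD w ((j : Int) + 1 + 1) ' '
            = PySem.List.pyGetD w (((j + 2 : Nat) : Int)) ' ' := by norm_cast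
          _ = w.getD (j + 2) ' ' := PySem.List.pyGetD_natCast w _ ' '
      rw [g1, g0, g2]
      rw [Bool.and_assoc] at hcond
      rcases Bool.and_eq_true_iff.mp hcond with ⟨hl0, hul⟩
      rcases Bool.and_eq_true_iff.mp hul with ⟨hu, hl2⟩
      rw [Bool.and_assoc]
      exact Bool.and_eq_true_iff.mpr ⟨hu, Bool.and_eq_true_iff.mpr ⟨hl0, hl2⟩⟩

theorem space_not_letter (c : Char) (h : PySem.Chars.isspace c = true) :
    PySem.Chars.islower c = false ∧ PySem.Chars.isupper c = false := by
  simp only [PySem.Chars.isspace, Char.toNat, Bool.or_eq_true, Bool.and_eq_true,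
    decide_eq_true_eq] at h
  simp only [PySem.Chars.islower, PySem.Chars.isupper, Char.le_def, UInt32.le_iff_toNat_le,
    Bool.and_eq_false_iff, decide_eq_false_iff_not, not_le]
  have h97 : ('a'.val).toNat = 97 := by decide
  have h122 : ('z'.val).toNat = 122 := by decide
  have h65 : ('A'.val).toNat = 65 := by decide
  have h90 : ('Z'.val).toNat = 90 := by decide
  rw [h97, h122, h65, h90]
  omega

-- a boundary character that is neither lower nor upper kills every triple crossing it
theorem tripleScan_head_skip (c : Char) (ys : List Char) (h : PySem.Chars.islower c = false) :
    tripleScan (c :: ys) = tripleScan ys := by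
  match ys with
  | [] => rfl
  | [y] => rfl
  | y1 :: y2 :: t => rw [tripleScan, h]; simp

theorem tripleScan_snd_skip (a c : Char) (ys : List Char) (h : PySem.Chars.isupper c = false)
    (hl : PySem.Chars.islower c = false) :
    tripleScan (a :: c :: ys) = tripleScan ys := by
  match ys with
  | [] => rfl
  | y :: t =>
    rw [tripleScan, h]
    simp [tripleScan_head_skip c (y :: t) hl]

theorem tripleScan_append_sep (c : Char) (hl : PySem.Chars.islower c = false)
    (hu : PySem.Chars.isupper c = false) :
    ∀ (xs ys : List Char), tripleScan (xs ++ c :: ys) = (tripleScan xs || tripleScan ys)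
  | [], ys => by simp [tripleScan_head_skip c ys hl, tripleScan]
  | [a], ys => by
      simp only [List.cons_append, List.nil_append]
      rw [tripleScan_snd_skip a c ys hu hl]
      simp [tripleScan]
  | a :: b :: xs'', ys => by
      have ih := tripleScan_append_sep c hl hu (b :: xs'') ys
      match xs'' with
      | [] =>
        simp only [List.cons_append, List.nil_append] at ih ⊢
        rw [tripleScan, hl]
        simp [tripleScan, ih]
      | d :: t =>
        simp only [List.cons_append] at ih ⊢
        rw [tripleScan]
        conv_rhs => rw [tripleScan]
        rw [ih]
        simp [Bool.or_assoc]
termination_by xs _ => xs.length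

theorem go_any (s : List Char) : ∀ (cur : List Char) (acc : List (List Char)),
    ((PySem.Chars.split₀.go s cur acc).any tripleScan)
      = (acc.any tripleScan || tripleScan (cur.reverse ++ s)) := by
  induction s with
  | nil =>
    intro cur acc
    cases cur with
    | nil => simp [PySem.Chars.split₀.go, tripleScan]
    | cons x xs =>
      rw [PySem.Chars.split₀.go]
      simp [Bool.or_comm]
  | cons c rest ih =>
    intro cur acc
    rw [PySem.Chars.split₀.go]
    by_cases hsp : PySem.Chars.isspace c = true
    · obtain ⟨hl, hu⟩ := space_not_letter c hsp
      rw [if_pos hsp]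
      cases cur with
      | nil =>
        simp only [List.isEmpty_nil, if_pos]
        rw [ih [] acc]
        simp [tripleScan_head_skip c rest hl]
      | cons x xs =>
        rw [if_neg (by simp)]
        rw [ih [] ((x :: xs).reverse :: acc)]
        simp only [List.any_cons, List.reverse_nil, List.nil_append]
        rw [tripleScan_append_sep c hl hu ((x :: xs).reverse) rest]
        rw [Bool.or_comm (tripleScan (x :: xs).reverse) (acc.any tripleScan), Bool.or_assoc]
    · rw [if_neg hsp]
      rw [ih (c :: cur) acc]
      simp

theorem split_any_tripleScan (l : List Char) :
    (PySem.Chars.split₀ l).any tripleScan = tripleScan l := by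
  rw [PySem.Chars.split₀, go_any l [] []]
  simp

-- ===== VERDICT (by name: the statement is the Claim_ definition above) =====
theorem has_case_corruption_spec : Claim_equal_has_case_corruption := by
  intro text _
  unfold Spec_has_case_corruption has_case_corruption has_case_corruption_alt
  by_cases hguard : (text = "" || text.toList.length < 3) = true
  · rw [if_pos hguard]
    rcases Bool.or_eq_true_iff.mp hguard with h | h
    · rw [of_decide_eq_true h]
      simp [tripleScan]
    · rw [tripleScan_short text.toList (of_decide_eq_true h)]
  · rw [if_neg hguard]
    rw [PySem.List.any_congr_mem (fun w _ => hccWord_eq w)]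
    exact split_any_tripleScan text.toList
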